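-- pv_equiv track=rewrite | github.com/Adnene93/FSSD | FSSD/enumerator/enumerator_attribute_numeric.py | closed_numeric_index
-- ===== SOURCE A (Python) =====
-- from bisect import bisect
--
-- def closed_numeric_index(domain,datasetIndices,list_patterns,attr):
--     attr_name=attr['name']
--     #list_patterns=[x[attr_name] for x in list_patterns]
--     clos_0=list_patterns[0][attr_name]
--     clos_1=clos_0
--     for v in list_patterns:
--         k=v[attr_name]
--         if k<clos_0 :clos_0 = k
--         elif k>clos_1 : clos_1 = k
-- #     clos=sorted(set(list_patterns))
-- #     clos_0=clos[0]
-- #     clos_1=clos[-1]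
--     #print domain[bisect(domain,clos_0)-1:bisect(domain,clos_1)],set([x[attr_name] for x in list_patterns])
--
--     return domain[bisect(domain,clos_0)-1:bisect(domain,clos_1)]
-- ===== SOURCE B (Python) =====
-- from bisect import bisect
--
--
-- def _extremes(vals):
--     # divide-and-conquer (min, max) of a non-empty list
--     if len(vals) == 1:
--         return (vals[0], vals[0])
--     mid = len(vals) // 2
--     a0, a1 = _extremes(vals[:mid])
--     b0, b1 = _extremes(vals[mid:])
--     return (min(a0, b0), max(a1, b1))
--
--
-- def closed_numeric_index(domain, datasetIndices, list_patterns, attr):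
--     vals = [v[attr['name']] for v in list_patterns]
--     lo, hi = _extremes(vals)
--     return domain[bisect(domain, lo) - 1:bisect(domain, hi)]
-- ===== Notes on version B (the rewrite author's own statement) =====
-- stated objective: alternative
-- what changed: Replaces A's single-pass min/max tracking loop with conditional updates by first extracting the attribute values into a list and then computing the (min, max) pair with a divide-and-conquer recursion over halves; the final bisect slice is unchanged.
import Mathlib
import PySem

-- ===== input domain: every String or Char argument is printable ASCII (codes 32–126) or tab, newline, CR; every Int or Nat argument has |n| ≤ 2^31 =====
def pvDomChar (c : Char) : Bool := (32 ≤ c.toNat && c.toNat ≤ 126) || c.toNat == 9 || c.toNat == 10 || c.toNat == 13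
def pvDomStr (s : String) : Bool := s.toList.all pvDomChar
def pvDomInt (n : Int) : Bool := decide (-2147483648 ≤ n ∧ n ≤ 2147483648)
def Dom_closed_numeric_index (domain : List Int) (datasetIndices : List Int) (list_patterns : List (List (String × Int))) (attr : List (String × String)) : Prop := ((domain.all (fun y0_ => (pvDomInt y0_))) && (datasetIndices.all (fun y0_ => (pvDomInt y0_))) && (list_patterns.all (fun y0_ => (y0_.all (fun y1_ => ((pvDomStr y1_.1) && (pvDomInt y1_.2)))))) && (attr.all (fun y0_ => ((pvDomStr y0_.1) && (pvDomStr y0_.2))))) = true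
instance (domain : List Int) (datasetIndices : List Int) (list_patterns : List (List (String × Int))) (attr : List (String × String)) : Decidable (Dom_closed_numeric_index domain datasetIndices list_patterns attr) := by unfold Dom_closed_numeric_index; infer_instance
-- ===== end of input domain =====

-- B replaces A's single-pass min/max tracking loop by first extracting the attribute values and
-- then computing the (min, max) pair with a divide-and-conquer recursion over halves
-- (objective: alternative).

-- ===== PORT A =====
def closed_numeric_index (domain : List Int) (datasetIndices : List Int) (list_patterns : List (List (String × Int))) (attr : List (String × String)) : List Int :=
  let attr_name := (PySem.Dict.mk attr).getD "name" ""
  let clos_0 := (PySem.Dict.mk (PySem.List.pyGetD list_patterns 0 [])).getD attr_name 0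
  let p := list_patterns.foldl
    (fun (c : Int × Int) v =>
      let k := (PySem.Dict.mk v).getD attr_name 0
      if k < c.1 then (k, c.2) else if c.2 < k then (c.1, k) else c)
    (clos_0, clos_0)
  PySem.List.slice domain (some ((PySem.List.bisectRight domain p.1 : Int) - 1)) (some ((PySem.List.bisectRight domain p.2 : Int)))

-- ===== PORT B =====
-- _extremes from Source B; vals[:mid] / vals[mid:] are ported as take/drop, exact since 0 ≤ mid ≤ len(vals);
-- the 'length ≤ 1' guard (Source B tests 'length == 1') only makes the recursion total: Source B never reaches
-- the empty case from closed_numeric_index (Pre_ requires a non-empty list_patterns).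
def pvExtremes (vals : List Int) : Int × Int :=
  if vals.length ≤ 1 then (PySem.List.pyGetD vals 0 0, PySem.List.pyGetD vals 0 0)
  else
    let mid := vals.length / 2
    let a := pvExtremes (vals.take mid)
    let b := pvExtremes (vals.drop mid)
    (min a.1 b.1, max a.2 b.2)
termination_by vals.length
decreasing_by
  · simp only [List.length_take]; omega
  · simp only [List.length_drop]; omega

def closed_numeric_index_alt (domain : List Int) (datasetIndices : List Int) (list_patterns : List (List (String × Int))) (attr : List (String × String)) : List Int :=
  let vals := list_patterns.map (fun v => (PySem.Dict.mk v).getD ((PySem.Dict.mk attr).getD "name" "") 0)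
  let e := pvExtremes vals
  PySem.List.slice domain (some ((PySem.List.bisectRight domain e.1 : Int) - 1)) (some ((PySem.List.bisectRight domain e.2 : Int)))

-- ===== PRECONDITION & SPEC =====
-- Pre_ excludes exactly the inputs on which the Python A raises: an empty list_patterns
-- (IndexError on list_patterns[0]) and dicts missing the looked-up key (KeyError).
def Pre_closed_numeric_index (domain : List Int) (datasetIndices : List Int) (list_patterns : List (List (String × Int))) (attr : List (String × String)) : Prop :=
  list_patterns ≠ [] ∧ (PySem.Dict.mk attr).contains "name" = true ∧
  ∀ v ∈ list_patterns, (PySem.Dict.mk v).contains ((PySem.Dict.mk attr).getD "name" "") = true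
instance (domain : List Int) (datasetIndices : List Int) (list_patterns : List (List (String × Int))) (attr : List (String × String)) : Decidable (Pre_closed_numeric_index domain datasetIndices list_patterns attr) := by unfold Pre_closed_numeric_index; infer_instance

def pvWitness_closed_numeric_index : List Int × List Int × (List (List (String × Int))) × (List (String × String)) :=
  ([0, 2, 5], [1], [[("x", 3)], [("x", 1)]], [("name", "x")])

def Spec_closed_numeric_index (domain : List Int) (datasetIndices : List Int) (list_patterns : List (List (String × Int))) (attr : List (String × String)) (out : List Int) : Prop := out = closed_numeric_index_alt domain datasetIndices list_patterns attr
instance (domain : List Int) (datasetIndices : List Int) (list_patterns : List (List (String × Int))) (attr : List (String × String)) (out : List Int) : Decidable (Spec_closed_numeric_index domain datasetIndices list_patterns attr out) := by unfold Spec_closed_numeric_index; infer_instance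

-- ===== CLAIM (what is proved, stated in full; the proofs are below) =====
def Claim_equal_closed_numeric_index : Prop := ∀ (domain : List Int) (datasetIndices : List Int) (list_patterns : List (List (String × Int))) (attr : List (String × String)), Dom_closed_numeric_index domain datasetIndices list_patterns attr → Pre_closed_numeric_index domain datasetIndices list_patterns attr → Spec_closed_numeric_index domain datasetIndices list_patterns attr (closed_numeric_index domain datasetIndices list_patterns attr)

-- ===== LEMMAS AND PROOFS =====

theorem pv_witness_ok : Dom_closed_numeric_index (pvWitness_closed_numeric_index.1) (pvWitness_closed_numeric_index.2.1) (pvWitness_closed_numeric_index.2.2.1) (pvWitness_closed_numeric_index.2.2.2) ∧ Pre_closed_numeric_index (pvWitness_closed_numeric_index.1) (pvWitness_closed_numeric_index.2.1) (pvWitness_closed_numeric_index.2.2.1) (pvWitness_closed_numeric_index.2.2.2) := by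
  constructor
  · decide
  · unfold Pre_closed_numeric_index pvWitness_closed_numeric_index; decide

-- A's fold computes the running minimum and maximum of the extracted values.
theorem pv_fold_A (name : String) (lp : List (List (String × Int))) : ∀ (a b : Int), a ≤ b →
    lp.foldl
      (fun (c : Int × Int) v =>
        if (PySem.Dict.mk v).getD name 0 < c.1 then ((PySem.Dict.mk v).getD name 0, c.2)
        else if c.2 < (PySem.Dict.mk v).getD name 0 then (c.1, (PySem.Dict.mk v).getD name 0)
        else c) (a, b)
    = ((lp.map (fun v => (PySem.Dict.mk v).getD name 0)).foldl min a,
       (lp.map (fun v => (PySem.Dict.mk v).getD name 0)).foldl max b) := by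
  induction lp with
  | nil => intro a b _; simp
  | cons v t ih =>
    intro a b hab
    simp only [List.foldl_cons, List.map_cons]
    have hstep : (if (PySem.Dict.mk v).getD name 0 < a then ((PySem.Dict.mk v).getD name 0, b)
        else if b < (PySem.Dict.mk v).getD name 0 then (a, (PySem.Dict.mk v).getD name 0)
        else (a, b))
        = (min a ((PySem.Dict.mk v).getD name 0), max b ((PySem.Dict.mk v).getD name 0)) := by
      split_ifs with h1 h2 <;> simp_all <;> omega
    rw [hstep, ih (min a ((PySem.Dict.mk v).getD name 0)) (max b ((PySem.Dict.mk v).getD name 0)) (by omega)]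

-- min?/max? of an append of non-empty lists merge with min/max.
theorem pv_min?_append (l1 l2 : List Int) (a b : Int) (h1 : l1.min? = some a) (h2 : l2.min? = some b) :
    (l1 ++ l2).min? = some (min a b) := by
  obtain ⟨ha, hba⟩ := List.min?_eq_some_iff.mp h1
  obtain ⟨hb, hbb⟩ := List.min?_eq_some_iff.mp h2
  rw [List.min?_eq_some_iff]
  constructor
  · rcases le_total a b with h | h
    · rw [min_eq_left h]; exact List.mem_append_left _ ha
    · rw [min_eq_right h]; exact List.mem_append_right _ hb
  · intro x hx
    rcases List.mem_append.mp hx with hx | hx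
    · exact le_trans (min_le_left a b) (hba x hx)
    · exact le_trans (min_le_right a b) (hbb x hx)

theorem pv_max?_append (l1 l2 : List Int) (a b : Int) (h1 : l1.max? = some a) (h2 : l2.max? = some b) :
    (l1 ++ l2).max? = some (max a b) := by
  obtain ⟨ha, hba⟩ := List.max?_eq_some_iff.mp h1
  obtain ⟨hb, hbb⟩ := List.max?_eq_some_iff.mp h2
  rw [List.max?_eq_some_iff]
  constructor
  · rcases le_total a b with h | h
    · rw [max_eq_right h]; exact List.mem_append_right _ hb
    · rw [max_eq_left h]; exact List.mem_append_left _ ha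
  · intro x hx
    rcases List.mem_append.mp hx with hx | hx
    · exact le_trans (hba x hx) (le_max_left a b)
    · exact le_trans (hbb x hx) (le_max_right a b)

-- B's divide-and-conquer recursion computes exactly the minimum and maximum of a non-empty list.
theorem pv_extremes_minmax : ∀ (n : Nat) (l : List Int), l.length = n → l ≠ [] →
    l.min? = some (pvExtremes l).1 ∧ l.max? = some (pvExtremes l).2 := by
  intro n
  induction n using Nat.strong_induction_on with
  | _ n ih =>
    intro l hlen hne
    unfold pvExtremes
    by_cases hle : l.length ≤ 1
    · obtain ⟨x, t, rfl⟩ := List.exists_cons_of_ne_nil hne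
      have ht : t = [] := by
        cases t with
        | nil => rfl
        | cons y s => simp at hle
      subst ht
      simp [PySem.List.pyGetD_zero_cons]
    · rw [if_neg hle]
      have h2 : 2 ≤ l.length := by omega
      have htne : l.take (l.length / 2) ≠ [] :=
        List.ne_nil_of_length_pos (by rw [List.length_take]; omega)
      have hdne : l.drop (l.length / 2) ≠ [] :=
        List.ne_nil_of_length_pos (by rw [List.length_drop]; omega)
      have hta := ih (l.take (l.length / 2)).length (by rw [List.length_take]; omega)
        (l.take (l.length / 2)) rfl htne
      have hda := ih (l.drop (l.length / 2)).length (by rw [List.length_drop]; omega)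
        (l.drop (l.length / 2)) rfl hdne
      refine ⟨?_, ?_⟩
      · show l.min? = some (min (pvExtremes (l.take (l.length / 2))).1 (pvExtremes (l.drop (l.length / 2))).1)
        conv_lhs => rw [← List.take_append_drop (l.length / 2) l]
        exact pv_min?_append _ _ _ _ hta.1 hda.1
      · show l.max? = some (max (pvExtremes (l.take (l.length / 2))).2 (pvExtremes (l.drop (l.length / 2))).2)
        conv_lhs => rw [← List.take_append_drop (l.length / 2) l]
        exact pv_max?_append _ _ _ _ hta.2 hda.2

-- ===== VERDICT (by name: the statement is the Claim_ definition above) =====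
theorem closed_numeric_index_spec : Claim_equal_closed_numeric_index := by
  intro domain datasetIndices list_patterns attr _ hpre
  unfold Spec_closed_numeric_index
  obtain ⟨hne, -, -⟩ := hpre
  obtain ⟨p, rest, rfl⟩ := List.exists_cons_of_ne_nil hne
  unfold closed_numeric_index closed_numeric_index_alt
  simp only [PySem.List.pyGetD_zero_cons]
  rw [pv_fold_A ((PySem.Dict.mk attr).getD "name" "") (p :: rest) _ _ (le_refl _)]
  simp only [List.map_cons]
  have hne' : ((PySem.Dict.mk p).getD ((PySem.Dict.mk attr).getD "name" "") 0 ::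
      rest.map (fun v => (PySem.Dict.mk v).getD ((PySem.Dict.mk attr).getD "name" "") 0)) ≠ [] := by simp
  obtain ⟨hmin, hmax⟩ := pv_extremes_minmax _ _ rfl hne'
  rw [List.min?_cons'] at hmin
  rw [List.max?_cons'] at hmax
  simp only [List.foldl_cons, min_self, max_self]
  rw [Option.some.inj hmin, Option.some.inj hmax]
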